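-- pv_equiv track=rewrite | github.com/cirosantilli/project-euler-solvers | solvers/440.py | _counts_N_and_rest
-- ===== SOURCE A (Python) =====
-- def _mobius_upto(n: int) -> list[int]:
--     """Linear sieve for Möbius mu(1..n)."""
--     mu = [0] * (n + 1)
--     mu[1] = 1
--     primes: list[int] = []
--     is_comp = [False] * (n + 1)
--
--     for i in range(2, n + 1):
--         if not is_comp[i]:
--             primes.append(i)
--             mu[i] = -1
--         for p in primes:
--             ip = i * p
--             if ip > n:
--                 break
--             is_comp[ip] = True
--             if i % p == 0:
--                 mu[ip] = 0
--                 break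
--             mu[ip] = -mu[i]
--     return mu
--
-- def _counts_N_and_rest(L: int) -> tuple[list[int], int]:
--     """
--     For each g, let N[g] be the number of ordered pairs (a,b) with:
--       1<=a,b<=L, gcd(a,b)=g, and (a/g) and (b/g) are both odd.
--
--     Then for fixed c, pairs not counted in N contribute gcd(...) = 1 (c even) or 2 (c odd),
--     hence a small constant Lucas term.
--
--     Returns (N, rest) where rest = L^2 - sum_g N[g].
--     """
--     mu = _mobius_upto(L)
--
--     # f(n) = #{(x,y): 1<=x,y<=n, x,y odd, gcd(x,y)=1}
--     # f(n) = sum_{d odd<=n} mu(d) * ((floor(n/d)+1)//2)^2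
--     f = [0] * (L + 1)
--     for n in range(1, L + 1):
--         s = 0
--         for d in range(1, n + 1, 2):  # odd d only
--             md = mu[d]
--             if md:
--                 t = (n // d + 1) // 2  # number of odd multiples of d up to n
--                 s += md * t * t
--         f[n] = s
--
--     N = [0] * (L + 1)
--     sumN = 0
--     for g in range(1, L + 1):
--         v = f[L // g]
--         N[g] = v
--         sumN += v
--
--     rest = L * L - sumN
--     return N, rest
-- ===== SOURCE B (Python) =====
-- def _mobius_upto(n: int) -> list[int]:
--     """Linear sieve for Möbius mu(1..n)."""
--     mu = [0] * (n + 1)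
--     mu[1] = 1
--     primes: list[int] = []
--     is_comp = [False] * (n + 1)
--
--     for i in range(2, n + 1):
--         if not is_comp[i]:
--             primes.append(i)
--             mu[i] = -1
--         for p in primes:
--             ip = i * p
--             if ip > n:
--                 break
--             is_comp[ip] = True
--             if i % p == 0:
--                 mu[ip] = 0
--                 break
--             mu[ip] = -mu[i]
--     return mu
--
-- def _counts_N_and_rest(L: int) -> tuple[list[int], int]:
--     """Same values as A, computed by quotient-block summation: with
--     Modd[d] = sum of mu[e] over odd e <= d (one prefix pass), each
--     f(n) = sum over blocks of constant q = n//d of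
--     (Modd[d2]-Modd[d-1]) * ((q+1)//2)^2, evaluated in O(sqrt n) per call,
--     so no f[1..L] table is needed."""
--     mu = _mobius_upto(L)
--
--     Modd = [0] * (L + 1)
--     acc = 0
--     for d in range(1, L + 1):
--         if d % 2 == 1:
--             acc += mu[d]
--         Modd[d] = acc
--
--     def f(n: int) -> int:
--         s = 0
--         d = 1
--         while d <= n:
--             q = n // d
--             d2 = n // q
--             t = (q + 1) // 2
--             s += (Modd[d2] - Modd[d - 1]) * t * t
--             d = d2 + 1
--         return s
--
--     N = [0] * (L + 1)
--     sumN = 0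
--     for g in range(1, L + 1):
--         v = f(L // g)
--         N[g] = v
--         sumN += v
--
--     return N, L * L - sumN
-- ===== Notes on version B (the rewrite author's own statement) =====
-- stated objective: faster
-- what changed: B drops the whole f[1..L] table and the per-n O(n) Moebius sums: it builds one prefix-sum array Modd of mu over odd indices and evaluates f(n) at each quotient L//g by O(sqrt n) quotient-block summation (Modd[d2]-Modd[d-1]) * ((q+1)//2)^2.
import Mathlib
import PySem

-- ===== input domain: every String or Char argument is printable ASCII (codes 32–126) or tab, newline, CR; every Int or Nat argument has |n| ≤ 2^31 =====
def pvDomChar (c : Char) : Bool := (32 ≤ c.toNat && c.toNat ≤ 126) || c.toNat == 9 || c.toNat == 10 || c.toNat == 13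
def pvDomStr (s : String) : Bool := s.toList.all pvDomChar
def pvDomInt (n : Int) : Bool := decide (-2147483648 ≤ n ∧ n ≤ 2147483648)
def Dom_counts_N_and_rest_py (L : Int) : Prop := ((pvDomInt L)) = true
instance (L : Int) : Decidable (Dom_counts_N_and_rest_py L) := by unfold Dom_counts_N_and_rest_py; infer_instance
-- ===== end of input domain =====

-- B replaces A's f[1..L] table (each entry an O(n) Möbius sum) by a prefix-sum array of mu
-- over odd indices plus quotient-block evaluation of f only at the needed values L//g: faster.

-- ===== PORT A =====
-- Shared helper: the linear Möbius sieve `_mobius_upto` (identical code in Source A and Source B).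
-- Loop counters and list indices are Nat here: every Python index in this code is ≥ 0 and
-- in range by construction, so `List.set`/`List.getD` are exact for the Python list accesses.
-- Inner `for p in primes` loop with its two `break`s, as structural recursion over primes:
def pvMuInner (n i : Nat) : List Nat → List Int × List Bool → List Int × List Bool
  | [], st => st
  | p :: ps, (mu, isComp) =>
    let ip := i * p
    if n < ip then (mu, isComp)
    else
      let isComp := isComp.set ip true
      if i % p == 0 then (mu.set ip 0, isComp)
      else pvMuInner n i ps (mu.set ip (-(mu.getD i 0)), isComp)

def pvMobiusUpto (n : Nat) : List Int :=
  let mu := (List.replicate (n + 1) (0 : Int)).set 1 1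
  let isComp := List.replicate (n + 1) false
  let res := (List.range' 2 (n - 1)).foldl
    (fun (st : List Int × List Bool × List Nat) i =>
      let (mu, isComp, primes) := st
      let (mu, primes) :=
        if isComp.getD i false then (mu, primes)
        else (mu.set i (-1), primes ++ [i])
      let (mu, isComp) := pvMuInner n i primes (mu, isComp)
      (mu, isComp, primes))
    (mu, isComp, [])
  res.1

-- A's inner sum over odd d (range(1, n+1, 2)).
def pvFOdd (mu : List Int) (n : Nat) : Int :=
  (List.range' 1 ((n + 1) / 2) 2).foldl
    (fun s d =>
      let md := mu.getD d 0
      if md == 0 then s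
      else
        let t : Int := ((n / d + 1) / 2 : Nat)
        s + md * t * t) 0

def counts_N_and_rest_py (L : Int) : List Int × Int :=
  let Ln := L.toNat
  let mu := pvMobiusUpto Ln
  let f := (List.range' 1 Ln).foldl (fun f n => f.set n (pvFOdd mu n))
      (List.replicate (Ln + 1) (0 : Int))
  let res := (List.range' 1 Ln).foldl
    (fun (st : List Int × Int) g =>
      let v := f.getD (Ln / g) 0
      (st.1.set g v, st.2 + v))
    (List.replicate (Ln + 1) (0 : Int), (0 : Int))
  (res.1, L * L - res.2)

-- ===== PORT B =====
-- Source B's `Modd` loop: prefix sums of mu over odd indices, threading the accumulator `acc`.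
def pvModd (mu : List Int) (Ln : Nat) : List Int :=
  ((List.range' 1 Ln).foldl
    (fun (st : List Int × Int) d =>
      let acc := if d % 2 == 1 then st.2 + mu.getD d 0 else st.2
      (st.1.set d acc, acc))
    (List.replicate (Ln + 1) (0 : Int), 0)).1

-- termination fact for the `while d <= n` block loop: the next start n/(n/d)+1 exceeds d
theorem pv_le_div_div (n d : Nat) (h : d ≤ n) : d ≤ n / (n / d) := by
  rcases Nat.eq_zero_or_pos d with h0 | h0
  · exact h0 ▸ Nat.zero_le _
  · have hq : 1 ≤ n / d := (Nat.one_le_div_iff h0).mpr h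
    exact (Nat.le_div_iff_mul_le hq).mpr (by rw [Nat.mul_comm]; exact Nat.div_mul_le_self n d)

-- Source B's `while d <= n` loop inside f, as recursion on d (d strictly increases).
def pvFBlockGo (modd : List Int) (n d : Nat) (s : Int) : Int :=
  if h : d ≤ n then
    let q := n / d
    let d2 := n / q
    let t : Int := ((q + 1) / 2 : Nat)
    pvFBlockGo modd n (d2 + 1) (s + (modd.getD d2 0 - modd.getD (d - 1) 0) * t * t)
  else s
termination_by n + 1 - d
decreasing_by
  have := pv_le_div_div n d h
  omega

def pvFBlocks (modd : List Int) (n : Nat) : Int := pvFBlockGo modd n 1 0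

def counts_N_and_rest_py_alt (L : Int) : List Int × Int :=
  let Ln := L.toNat
  let mu := pvMobiusUpto Ln
  let modd := pvModd mu Ln
  let res := (List.range' 1 Ln).foldl
    (fun (st : List Int × Int) g =>
      let v := pvFBlocks modd (Ln / g)
      (st.1.set g v, st.2 + v))
    (List.replicate (Ln + 1) (0 : Int), (0 : Int))
  (res.1, L * L - res.2)

-- ===== PRECONDITION & SPEC =====
-- Python A raises IndexError (`mu[1] = 1` on a too-short list) for every L ≤ 0; it returns
-- normally exactly when 1 ≤ L.  (Source B raises there too.)
def Pre_counts_N_and_rest_py (L : Int) : Prop := 1 ≤ L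
instance (L : Int) : Decidable (Pre_counts_N_and_rest_py L) := by unfold Pre_counts_N_and_rest_py; infer_instance
def pvWitness_counts_N_and_rest_py : Int := 4

def Spec_counts_N_and_rest_py (L : Int) (out : List Int × Int) : Prop := out = counts_N_and_rest_py_alt L
instance (L : Int) (out : List Int × Int) : Decidable (Spec_counts_N_and_rest_py L out) := by unfold Spec_counts_N_and_rest_py; infer_instance

-- ===== CLAIM (what is proved, stated in full; the proofs are below) =====
def Claim_equal_counts_N_and_rest_py : Prop := ∀ (L : Int), Dom_counts_N_and_rest_py L → Pre_counts_N_and_rest_py L → Spec_counts_N_and_rest_py L (counts_N_and_rest_py L)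

-- ===== LEMMAS AND PROOFS =====

-- the odd-only Möbius summand of A's inner sum, and its mu-prefix sums
def pvTerm (mu : List Int) (n e : Nat) : Int :=
  if e % 2 = 1 then mu.getD e 0 * ((n / e + 1) / 2 : Nat) * ((n / e + 1) / 2 : Nat) else 0

def pvPre (mu : List Int) (m : Nat) : Int :=
  ∑ e ∈ Finset.Ioc 0 m, (if e % 2 = 1 then mu.getD e 0 else 0)

-- A `for n in range(a, a+len): f[n] = F(n)` loop leaves indices below a untouched …
theorem pv_getD_foldl_set_lt (F : Nat → Int) :
    ∀ (len a : Nat) (init : List Int) (m : Nat), m < a →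
      ((List.range' a len).foldl (fun f n => f.set n (F n)) init).getD m 0 = init.getD m 0 := by
  intro len
  induction len with
  | zero => intro a init m _; rfl
  | succ k ih =>
    intro a init m hm
    rw [List.range'_succ, List.foldl_cons, ih (a + 1) _ m (by omega)]
    simp [List.getD, List.getElem?_set_ne (by omega : a ≠ m)]

-- … and stores F(m) at every index a ≤ m < a+len (init long enough).
theorem pv_getD_foldl_set (F : Nat → Int) :
    ∀ (len a : Nat) (init : List Int) (m : Nat), a ≤ m → m < a + len → a + len ≤ init.length →
      ((List.range' a len).foldl (fun f n => f.set n (F n)) init).getD m 0 = F m := by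
  intro len
  induction len with
  | zero => intro a init m h1 h2 _; omega
  | succ k ih =>
    intro a init m h1 h2 h3
    rw [List.range'_succ, List.foldl_cons]
    by_cases hm : m = a
    · subst hm
      rw [pv_getD_foldl_set_lt F k (m + 1) _ m (by omega)]
      simp [List.getD, (by omega : m < init.length)]
    · exact ih (a + 1) (init.set a (F a)) m (by omega) (by omega) (by simp; omega)

-- B's Modd fold is the plain "store pvPre at each index" fold (accumulator threading).
theorem pv_modd_fold (mu : List Int) :
    ∀ (len a : Nat) (li : List Int), 1 ≤ a →
      ((List.range' a len).foldl
        (fun (st : List Int × Int) d =>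
          let acc := if d % 2 == 1 then st.2 + mu.getD d 0 else st.2
          (st.1.set d acc, acc))
        (li, pvPre mu (a - 1))).1
      = (List.range' a len).foldl (fun f d => f.set d (pvPre mu d)) li := by
  intro len
  induction len with
  | zero => intro a li _; rfl
  | succ k ih =>
    intro a li ha
    obtain ⟨m, rfl⟩ : ∃ m, a = m + 1 := ⟨a - 1, by omega⟩
    rw [List.range'_succ, List.foldl_cons, List.foldl_cons]
    have hsplit : pvPre mu (m + 1)
        = pvPre mu m + (if (m + 1) % 2 = 1 then mu.getD (m + 1) 0 else 0) := by
      unfold pvPre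
      rw [Finset.sum_Ioc_succ_top (by omega)]
    have hacc : (if (m + 1) % 2 == 1 then pvPre mu (m + 1 - 1) + mu.getD (m + 1) 0
          else pvPre mu (m + 1 - 1)) = pvPre mu (m + 1) := by
      simp only [Nat.add_sub_cancel]
      by_cases hp : (m + 1) % 2 = 1 <;> simp [hp, hsplit]
    simp only
    rw [hacc]
    have := ih (m + 2) (li.set (m + 1) (pvPre mu (m + 1))) (by omega)
    simp only [show m + 2 - 1 = m + 1 by omega] at this
    exact this

theorem pv_modd_getD (mu : List Int) (Ln m : Nat) (hm : m ≤ Ln) :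
    (pvModd mu Ln).getD m 0 = pvPre mu m := by
  unfold pvModd
  have h0 : pvPre mu 0 = 0 := by simp [pvPre]
  have hfold := pv_modd_fold mu Ln 1 (List.replicate (Ln + 1) (0 : Int)) (by omega)
  simp only [show (1 : Nat) - 1 = 0 by rfl, h0] at hfold
  rw [hfold]
  rcases Nat.eq_zero_or_pos m with h | h
  · subst h
    rw [pv_getD_foldl_set_lt (pvPre mu) Ln 1 _ 0 (by omega)]
    simp [h0]
  · rw [pv_getD_foldl_set (pvPre mu) Ln 1 _ m h (by omega) (by simp; omega)]

-- quotient blocks: every e in [d, n/(n/d)] has the same quotient n/e = n/d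
theorem pv_div_const (n d e : Nat) (h1 : 1 ≤ d) (h2 : d ≤ n) (h3 : d ≤ e) (h4 : e ≤ n / (n / d)) :
    n / e = n / d := by
  have hq : 1 ≤ n / d := (Nat.one_le_div_iff h1).mpr h2
  have hub : n / e ≤ n / d := Nat.div_le_div_left h3 (by omega)
  have he1 : 1 ≤ e := by omega
  have hlb : n / d ≤ n / e := by
    refine (Nat.le_div_iff_mul_le he1).mpr ?_
    calc n / d * e ≤ n / d * (n / (n / d)) := Nat.mul_le_mul_left _ h4
    _ ≤ n := Nat.mul_div_le n (n / d)
  omega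

-- the block-loop invariant: go adds exactly the remaining odd-Möbius tail sum
theorem pv_blockgo (mu modd : List Int) (Ln : Nat)
    (hmodd : ∀ m, m ≤ Ln → modd.getD m 0 = pvPre mu m) (n : Nat) (hn : n ≤ Ln) :
    ∀ (k d : Nat) (s : Int), 1 ≤ d → n + 1 - d ≤ k →
      pvFBlockGo modd n d s = s + ∑ e ∈ Finset.Ioc (d - 1) n, pvTerm mu n e := by
  intro k
  induction k with
  | zero =>
    intro d s hd hk
    rw [pvFBlockGo, dif_neg (by omega)]
    rw [show Finset.Ioc (d - 1) n = ∅ by apply Finset.Ioc_eq_empty; omega]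
    simp
  | succ k ih =>
    intro d s hd hk
    by_cases hdn : d ≤ n
    · rw [pvFBlockGo, dif_pos hdn]
      simp only
      have hq1 : 1 ≤ n / d := (Nat.one_le_div_iff hd).mpr hdn
      have hdd2 : d ≤ n / (n / d) := pv_le_div_div n d hdn
      have hd2n : n / (n / d) ≤ n := Nat.div_le_self n (n / d)
      rw [ih (n / (n / d) + 1) _ (by omega) (by omega)]
      simp only [Nat.add_sub_cancel]
      have hsplit : (∑ e ∈ Finset.Ioc (d - 1) (n / (n / d)), pvTerm mu n e)
          + ∑ e ∈ Finset.Ioc (n / (n / d)) n, pvTerm mu n e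
          = ∑ e ∈ Finset.Ioc (d - 1) n, pvTerm mu n e :=
        Finset.sum_Ioc_consecutive _ (by omega) hd2n
      have hdiff : modd.getD (n / (n / d)) 0 - modd.getD (d - 1) 0
          = ∑ e ∈ Finset.Ioc (d - 1) (n / (n / d)),
              (if e % 2 = 1 then mu.getD e 0 else 0) := by
        rw [hmodd _ (by omega), hmodd (d - 1) (by omega)]
        have hc := Finset.sum_Ioc_consecutive
          (fun e => if e % 2 = 1 then mu.getD e 0 else 0)
          (by omega : 0 ≤ d - 1) (by omega : d - 1 ≤ n / (n / d))
        unfold pvPre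
        linarith [hc]
      have hterm : ∀ e ∈ Finset.Ioc (d - 1) (n / (n / d)),
          pvTerm mu n e = (if e % 2 = 1 then mu.getD e 0 else 0)
            * ((n / d + 1) / 2 : Nat) * ((n / d + 1) / 2 : Nat) := by
        intro e he
        rw [Finset.mem_Ioc] at he
        unfold pvTerm
        rw [pv_div_const n d e hd hdn (by omega) he.2]
        by_cases hp : e % 2 = 1 <;> simp [hp]
      have hblock : (modd.getD (n / (n / d)) 0 - modd.getD (d - 1) 0)
            * ((n / d + 1) / 2 : Nat) * ((n / d + 1) / 2 : Nat)
          = ∑ e ∈ Finset.Ioc (d - 1) (n / (n / d)), pvTerm mu n e := by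
        rw [Finset.sum_congr rfl hterm, hdiff, ← Finset.sum_mul, ← Finset.sum_mul]
      rw [hblock, ← hsplit]
      ring
    · rw [pvFBlockGo, dif_neg hdn]
      rw [show Finset.Ioc (d - 1) n = ∅ by apply Finset.Ioc_eq_empty; omega]
      simp

-- the mapped odd arithmetic progression summed against the Ioc sum (evens contribute 0)
theorem pv_oddmap_sum (mu : List Int) (n : Nat) :
    ∀ (k a : Nat), 1 ≤ a → a % 2 = 1 →
      ((List.range' a k 2).map (fun d =>
          mu.getD d 0 * ((n / d + 1) / 2 : Nat) * ((n / d + 1) / 2 : Nat))).sum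
        = ∑ e ∈ Finset.Ioc (a - 1) (a + 2 * k - 2), pvTerm mu n e := by
  intro k
  induction k with
  | zero =>
    intro a ha hodd
    rw [show Finset.Ioc (a - 1) (a + 2 * 0 - 2) = ∅ by apply Finset.Ioc_eq_empty; omega]
    simp
  | succ k ih =>
    intro a ha hodd
    obtain ⟨b, rfl⟩ : ∃ b, a = b + 1 := ⟨a - 1, by omega⟩
    rw [List.range'_succ, List.map_cons, List.sum_cons, ih (b + 3) (by omega) (by omega)]
    simp only [show b + 3 - 1 = b + 2 by omega, show b + 1 - 1 = b by omega,
               show b + 3 + 2 * k - 2 = b + 2 * k + 1 by omega,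
               show b + 1 + 2 * (k + 1) - 2 = b + 2 * k + 1 by omega]
    have hFa : pvTerm mu n (b + 1)
        = mu.getD (b + 1) 0 * ((n / (b + 1) + 1) / 2 : Nat) * ((n / (b + 1) + 1) / 2 : Nat) := by
      unfold pvTerm
      rw [if_pos hodd]
    have hFa1 : pvTerm mu n (b + 2) = 0 := by
      unfold pvTerm
      rw [if_neg (by omega)]
    rcases Nat.eq_zero_or_pos k with hk | hk
    · subst hk
      rw [show Finset.Ioc (b + 2) (b + 2 * 0 + 1) = ∅ by apply Finset.Ioc_eq_empty; omega,
          show b + 2 * 0 + 1 = b + 1 by omega,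
          Finset.sum_Ioc_succ_top (le_refl b), show Finset.Ioc b b = ∅ from by simp]
      simp [hFa]
    · have h1 := Finset.sum_Ioc_consecutive (pvTerm mu n)
        (show b ≤ b + 2 by omega) (show b + 2 ≤ b + 2 * k + 1 by omega)
      have h2 : ∑ e ∈ Finset.Ioc b (b + 2), pvTerm mu n e
          = pvTerm mu n (b + 1) + pvTerm mu n (b + 2) := by
        rw [show b + 2 = (b + 1) + 1 by omega, Finset.sum_Ioc_succ_top (by omega),
            Finset.sum_Ioc_succ_top (le_refl b), show Finset.Ioc b b = ∅ from by simp]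
        simp
      rw [← h1, h2, hFa1, ← hFa]
      ring

-- A's inner fold equals the Ioc sum of pvTerm
theorem pv_fodd_eq_sum (mu : List Int) (n : Nat) :
    pvFOdd mu n = ∑ e ∈ Finset.Ioc 0 n, pvTerm mu n e := by
  unfold pvFOdd
  have hfn : (fun (s : Int) (d : Nat) =>
        let md := mu.getD d 0
        if md == 0 then s
        else
          let t : Int := ((n / d + 1) / 2 : Nat)
          s + md * t * t)
      = fun s d => s + mu.getD d 0 * ((n / d + 1) / 2 : Nat) * ((n / d + 1) / 2 : Nat) := by
    funext s d
    simp only [beq_iff_eq]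
    by_cases h : mu.getD d 0 = 0
    · rw [if_pos h, h]
      ring
    · rw [if_neg h]
  rw [hfn, PySem.List.foldl_add, pv_oddmap_sum mu n ((n + 1) / 2) 1 (by omega) (by omega)]
  rcases Nat.eq_zero_or_pos n with h0 | h0
  · subst h0
    norm_num
  · have htop := Finset.sum_Ioc_succ_top (show 0 ≤ n - 1 by omega) (pvTerm mu n)
    rw [show n - 1 + 1 = n by omega] at htop
    rcases Nat.even_or_odd n with he | ho
    · obtain ⟨c, rfl⟩ := he
      rw [show 1 + 2 * ((c + c + 1) / 2) - 2 = c + c - 1 by omega,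
          show (1 : Nat) - 1 = 0 by rfl]
      have hz : pvTerm mu (c + c) (c + c) = 0 := by
        unfold pvTerm
        rw [if_neg (by omega)]
      rw [zero_add, htop, hz, add_zero]
    · obtain ⟨c, rfl⟩ := ho
      rw [show 1 + 2 * ((2 * c + 1 + 1) / 2) - 2 = 2 * c + 1 by omega,
          show (1 : Nat) - 1 = 0 by rfl, zero_add]

theorem pv_f_eq (mu : List Int) (Ln n : Nat) (hn : n ≤ Ln) :
    pvFOdd mu n = pvFBlocks (pvModd mu Ln) n := by
  rw [pvFBlocks, pv_blockgo mu (pvModd mu Ln) Ln (fun m hm => pv_modd_getD mu Ln m hm) n hn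
      (n + 1) 1 0 (by omega) (by omega)]
  simp [pv_fodd_eq_sum]

-- ===== VERDICT (by name: the statement is the Claim_ definition above) =====
theorem counts_N_and_rest_py_spec : Claim_equal_counts_N_and_rest_py := by
  intro L _ hPre
  unfold Spec_counts_N_and_rest_py counts_N_and_rest_py counts_N_and_rest_py_alt
  have hLn : 1 ≤ L.toNat := by
    unfold Pre_counts_N_and_rest_py at hPre; omega
  set Ln := L.toNat with hLndef
  set mu := pvMobiusUpto Ln with hmu
  have hA : (List.range' 1 Ln).foldl
      (fun (st : List Int × Int) g =>
        let v := ((List.range' 1 Ln).foldl (fun f n => f.set n (pvFOdd mu n))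
            (List.replicate (Ln + 1) (0 : Int))).getD (Ln / g) 0
        (st.1.set g v, st.2 + v))
      (List.replicate (Ln + 1) (0 : Int), (0 : Int))
      = (List.range' 1 Ln).foldl
        (fun (st : List Int × Int) g =>
          let v := pvFBlocks (pvModd mu Ln) (Ln / g)
          (st.1.set g v, st.2 + v))
        (List.replicate (Ln + 1) (0 : Int), (0 : Int)) := by
    apply PySem.List.foldl_congr_mem'
    intro g hg acc
    have hg' : 1 ≤ g ∧ g < 1 + Ln := List.mem_range'_1.mp hg
    have h1 : 1 ≤ Ln / g := (Nat.one_le_div_iff (by omega)).mpr (by omega)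
    have h2 : Ln / g ≤ Ln := Nat.div_le_self Ln g
    simp only
    rw [pv_getD_foldl_set (pvFOdd mu) Ln 1 _ (Ln / g) h1 (by omega) (by simp; omega),
        pv_f_eq mu Ln (Ln / g) h2]
  simp only at hA ⊢
  rw [hA]
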